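-- pv_equiv track=rewrite | github.com/leolu66/61sClaw | workspace-main/skills/wechat-article-fetcher/scripts/batch_fetch.py | _select_best_match
-- ===== SOURCE A (Python) =====
-- from typing import List, Dict
--
-- def _select_best_match(accounts: List[Dict], keyword: str) -> Dict:
--     keyword_lower = keyword.lower()
--
--     for account in accounts:
--         if account.get('nickname', '').lower() == keyword_lower:
--             return account
--
--     for account in accounts:
--         if keyword_lower in account.get('nickname', '').lower():
--             return account
--
--     return accounts[0] if accounts else {}
-- ===== SOURCE B (Python) =====
-- from typing import List, Dict
--
-- def _select_best_match(accounts: List[Dict], keyword: str) -> Dict: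
--     keyword_lower = keyword.lower()
--     best_substring = None
--     for account in accounts:
--         nick = account.get('nickname', '').lower()
--         if nick == keyword_lower:
--             return account
--         if best_substring is None and keyword_lower in nick:
--             best_substring = account
--     if best_substring is not None:
--         return best_substring
--     return accounts[0] if accounts else {}
-- ===== Notes on version B (the rewrite author's own statement) =====
-- stated objective: simpler
-- what changed: Replaces A's two full passes over the accounts with a single pass that returns immediately on an exact nickname match and remembers the first substring match, lowering each nickname once instead of up to twice.
import Mathlib
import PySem

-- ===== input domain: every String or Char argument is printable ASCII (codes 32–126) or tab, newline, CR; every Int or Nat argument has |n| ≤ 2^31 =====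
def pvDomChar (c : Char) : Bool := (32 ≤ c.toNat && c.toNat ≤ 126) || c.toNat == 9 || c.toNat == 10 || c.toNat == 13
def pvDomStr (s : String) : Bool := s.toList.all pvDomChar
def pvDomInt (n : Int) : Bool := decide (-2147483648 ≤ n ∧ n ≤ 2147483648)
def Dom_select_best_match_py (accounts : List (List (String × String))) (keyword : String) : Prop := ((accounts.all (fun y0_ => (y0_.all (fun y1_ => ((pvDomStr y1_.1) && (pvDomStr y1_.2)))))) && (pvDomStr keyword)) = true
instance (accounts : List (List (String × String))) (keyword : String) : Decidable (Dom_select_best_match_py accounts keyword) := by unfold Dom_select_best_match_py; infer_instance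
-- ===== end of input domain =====

-- B replaces A's two passes with a single pass that returns on an exact match and remembers the first substring match.
-- ===== PORT A =====
-- account.get('nickname', '')
def sbmNick (account : List (String × String)) : String :=
  PySem.Dict.getD (PySem.Dict.mk account) "nickname" ""

def select_best_match_py (accounts : List (List (String × String))) (keyword : String) : List (String × String) :=
  let keyword_lower := PySem.Str.lower keyword
  -- first loop: exact nickname match
  match accounts.find? (fun account => PySem.Str.lower (sbmNick account) == keyword_lower) with
  | some account => account
  | none =>
    -- second loop: substring match
    match accounts.find? (fun account => PySem.Str.isIn keyword_lower (PySem.Str.lower (sbmNick account))) with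
    | some account => account
    | none =>
      match accounts with
      | [] => []
      | account :: _ => account

-- ===== PORT B =====
-- the single loop: early-returns 'some account' on an exact match, otherwise threads best_substring
def sbmLoop (keyword_lower : String) :
    List (List (String × String)) → Option (List (String × String)) → Option (List (String × String))
  | [], best_substring => best_substring
  | account :: rest, best_substring =>
    let nick := PySem.Str.lower (sbmNick account)
    if nick == keyword_lower then some account
    else sbmLoop keyword_lower rest
      (if best_substring.isNone && PySem.Str.isIn keyword_lower nick then some account else best_substring)

def select_best_match_py_alt (accounts : List (List (String × String))) (keyword : String) : List (String × String) :=
  match sbmLoop (PySem.Str.lower keyword) accounts none with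
  | some account => account
  | none =>
    match accounts with
    | [] => []
    | account :: _ => account

-- ===== PRECONDITION & SPEC =====
def Spec_select_best_match_py (accounts : List (List (String × String))) (keyword : String) (out : List (String × String)) : Prop := out = select_best_match_py_alt accounts keyword
instance (accounts : List (List (String × String))) (keyword : String) (out : List (String × String)) : Decidable (Spec_select_best_match_py accounts keyword out) := by unfold Spec_select_best_match_py; infer_instance

-- ===== CLAIM (what is proved, stated in full; the proofs are below) =====
def Claim_equal_select_best_match_py : Prop := ∀ (accounts : List (List (String × String))) (keyword : String), Dom_select_best_match_py accounts keyword → Spec_select_best_match_py accounts keyword (select_best_match_py accounts keyword)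

-- ===== LEMMAS AND PROOFS =====

-- ===== VERDICT (by name: the statement is the Claim_ definition above) =====
-- characterisation of the single loop by A's two scans
theorem sbmLoop_eq (kl : String) (accs : List (List (String × String)))
    (best : Option (List (String × String))) :
    sbmLoop kl accs best =
      match accs.find? (fun a => PySem.Str.lower (sbmNick a) == kl) with
      | some a => some a
      | none =>
        match best with
        | some b => some b
        | none => accs.find? (fun a => PySem.Str.isIn kl (PySem.Str.lower (sbmNick a))) := by
  induction accs generalizing best with
  | nil => cases best <;> rfl
  | cons a rest ih =>
    cases h : (PySem.Str.lower (sbmNick a) == kl) with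
    | true =>
      rw [List.find?_cons_of_pos (p := fun a => PySem.Str.lower (sbmNick a) == kl) (h := h)]
      simp only [sbmLoop, h, if_true]
    | false =>
      rw [List.find?_cons_of_neg (p := fun a => PySem.Str.lower (sbmNick a) == kl) (h := by simp [h])]
      simp only [sbmLoop, h, Bool.false_eq_true, if_false, ih]
      cases best with
      | some b => rfl
      | none =>
        cases hs : PySem.Str.isIn kl (PySem.Str.lower (sbmNick a)) with
        | true =>
          rw [List.find?_cons_of_pos (p := fun a => PySem.Str.isIn kl (PySem.Str.lower (sbmNick a))) (h := hs)]
          simp only [Option.isNone_none, Bool.and_true, if_true]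
        | false =>
          rw [List.find?_cons_of_neg (p := fun a => PySem.Str.isIn kl (PySem.Str.lower (sbmNick a))) (h := by simp only [Bool.not_eq_true]; exact hs)]
          simp only [Option.isNone_none, Bool.and_false, Bool.false_eq_true, if_false]

theorem select_best_match_py_spec : Claim_equal_select_best_match_py := by
  intro accounts keyword _
  unfold Spec_select_best_match_py select_best_match_py select_best_match_py_alt
  rw [sbmLoop_eq]
  cases h1 : accounts.find? (fun a => PySem.Str.lower (sbmNick a) == PySem.Str.lower keyword) with
  | some a => simp only [h1]
  | none =>
    cases h2 : accounts.find?
        (fun a => PySem.Str.isIn (PySem.Str.lower keyword) (PySem.Str.lower (sbmNick a))) with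
    | some a => simp only [h1, h2]
    | none => simp only [h1, h2]
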